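-- pv_equiv track=rewrite | github.com/turpure/py_algo | py_alg/play_array/delete_nth.py | delete_nth
-- ===== SOURCE A (Python) =====
-- def delete_nth(lst, n):
--   ret = []
--   count = {}
--   for ele in lst:
--     if count.get(ele,0) < n:
--       ret.append(ele)
--       if ele in count:
--         count[ele] += 1
--       else:
--         count[ele] = 1
--   return ret
-- ===== SOURCE B (Python) =====
-- def delete_nth(lst, n):
--   if n <= 0:
--     return []
--   groups = {}
--   for i, x in enumerate(lst):
--     groups.setdefault(x, []).append((i, x))
--   kept = [p for pairs in groups.values() for p in pairs[:n]]
--   kept.sort(key=lambda p: p[0])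
--   return [x for _, x in kept]
-- ===== Notes on version B (the rewrite author's own statement) =====
-- stated objective: alternative
-- what changed: Replaces the single filtering pass with a counts table by a staged group-and-merge algorithm: gather each value's (index, value) occurrence list in one pass, slice the first n occurrences per group, then sort the kept pairs by original index and project the values.
import Mathlib
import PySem

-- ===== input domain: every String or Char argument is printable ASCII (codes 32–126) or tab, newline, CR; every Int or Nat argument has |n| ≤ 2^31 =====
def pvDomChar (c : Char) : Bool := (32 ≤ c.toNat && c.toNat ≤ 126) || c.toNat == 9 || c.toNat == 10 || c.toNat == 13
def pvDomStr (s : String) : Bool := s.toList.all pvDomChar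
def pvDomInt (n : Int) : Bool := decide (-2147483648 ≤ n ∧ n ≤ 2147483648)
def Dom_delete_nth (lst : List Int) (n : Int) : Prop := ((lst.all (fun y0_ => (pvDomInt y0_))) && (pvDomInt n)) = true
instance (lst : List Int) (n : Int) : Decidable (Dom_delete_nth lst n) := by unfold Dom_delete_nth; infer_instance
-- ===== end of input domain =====

-- B replaces A's single filtering pass with a counts dict by a staged group-and-merge
-- algorithm: group (index, value) occurrences per value, keep the first n per group,
-- then sort the kept pairs by index and project the values (objective: alternative).


-- ===== PORT A =====
def delete_nth (lst : List Int) (n : Int) : List Int :=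
  (lst.foldl (fun (s : List Int × PySem.Dict Int Int) ele =>
      if s.2.getD ele 0 < n then
        (s.1 ++ [ele],
         if s.2.contains ele then s.2.insert ele (s.2.getD ele 0 + 1)
         else s.2.insert ele 1)
      else s)
    ([], PySem.Dict.empty)).1

-- ===== PORT B =====
def delete_nth_alt (lst : List Int) (n : Int) : List Int :=
  if n ≤ 0 then []
  else
    let groups : PySem.Dict Int (List (Int × Int)) :=
      (PySem.List.enumerate lst).foldl
        (fun d p => d.modify p.2 [] (fun v => v ++ [p])) PySem.Dict.empty
    let kept : List (Int × Int) :=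
      groups.values.foldl (fun acc pairs => acc ++ PySem.List.slice pairs none (some n)) []
    (PySem.List.sorted kept (fun p => p.1)).map (fun p => p.2)

-- ===== PRECONDITION & SPEC =====
def Spec_delete_nth (lst : List Int) (n : Int) (out : List Int) : Prop := out = delete_nth_alt lst n
instance (lst : List Int) (n : Int) (out : List Int) : Decidable (Spec_delete_nth lst n out) := by unfold Spec_delete_nth; infer_instance

-- ===== CLAIM (what is proved, stated in full; the proofs are below) =====
def Claim_equal_delete_nth : Prop := ∀ (lst : List Int) (n : Int), Dom_delete_nth lst n → Spec_delete_nth lst n (delete_nth lst n)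

-- ===== LEMMAS AND PROOFS =====

-- A's loop step, named for the lemmas (definitionally the lambda in `delete_nth`)
def pvStepA (n : Int) (s : List Int × PySem.Dict Int Int) (ele : Int) :
    List Int × PySem.Dict Int Int :=
  if s.2.getD ele 0 < n then
    (s.1 ++ [ele],
     if s.2.contains ele then s.2.insert ele (s.2.getD ele 0 + 1)
     else s.2.insert ele 1)
  else s

-- keep p iff fewer than n copies of its value occur before its index
def pvP (lst : List Int) (n : Int) (p : Int × Int) : Bool :=
  decide (((lst.take p.1.toNat).count p.2 : Int) < n)

-- the canonical answer: enumerated pairs surviving the "fewer than n before me" test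
def pvF (lst : List Int) (n : Int) : List (Int × Int) :=
  (PySem.List.enumerate lst).filter (pvP lst n)

-- B's per-value group, cut to its first n occurrences
def pvG (lst : List Int) (n : Int) (c : Int) : List (Int × Int) :=
  (((PySem.List.enumerate lst).filter (fun p => p.2 == c)).take n.toNat)

-- B's kept list before sorting
def pvK (lst : List Int) (n : Int) : List (Int × Int) :=
  (PySem.Set.ofList lst).flatMap (pvG lst n)

theorem pv_filterE_length (lst : List Int) (s c : Int) :
    ((PySem.List.enumerate lst s).filter (fun p => p.2 == c)).length = lst.count c := by
  conv_rhs => rw [List.count, ← PySem.List.map_snd_enumerate lst s, List.countP_map]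
  rw [← List.countP_eq_length_filter]
  rfl

theorem pvF_append (lst : List Int) (x : Int) (n : Int) :
    pvF (lst ++ [x]) n
      = pvF lst n ++ (if ((lst.count x : Int)) < n then [((lst.length : Int), x)] else []) := by
  unfold pvF
  rw [PySem.List.enumerate_append, List.filter_append]
  congr 1
  · apply List.filter_congr
    intro p hp
    rcases (PySem.List.mem_enumerate_iff lst 0 p).1 hp with ⟨k, hk, rfl⟩
    unfold pvP
    simp only [zero_add]
    rw [List.take_append_of_le_length (by simp; omega)]
  · rw [PySem.List.enumerate_cons, PySem.List.enumerate_nil]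
    simp only [zero_add, List.filter_cons, List.filter_nil]
    unfold pvP
    simp only [Int.toNat_natCast, List.take_left]
    split_ifs with h h2 h2 <;> simp_all

theorem pv_flatMap_perm (x : Int) (ex : List (Int × Int)) (g : Int → List (Int × Int)) :
    ∀ S : List Int, S.Nodup →
      (S.flatMap (fun c => g c ++ if c = x then ex else [])).Perm
        (S.flatMap g ++ if x ∈ S then ex else []) := by
  intro S
  induction S with
  | nil => simp
  | cons c S ih =>
    intro hnd
    rcases List.nodup_cons.1 hnd with ⟨hcS, hS⟩
    simp only [List.flatMap_cons]
    by_cases hc : c = x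
    · subst x
      have h2 := ih hS
      rw [if_neg hcS, List.append_nil] at h2
      rw [if_pos rfl, if_pos (List.mem_cons_self ..)]
      refine List.Perm.trans (List.Perm.append_left _ h2) ?_
      rw [List.append_assoc, List.append_assoc]
      exact List.Perm.append_left _ List.perm_append_comm
    · have hmem : (if x ∈ c :: S then ex else []) = (if x ∈ S then ex else []) := by
        by_cases hxS : x ∈ S
        · rw [if_pos (List.mem_cons_of_mem _ hxS), if_pos hxS]
        · rw [if_neg (by simp [List.mem_cons, hxS]; exact fun h => hc h.symm), if_neg hxS]
      rw [if_neg hc, List.append_nil, hmem, List.append_assoc]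
      exact List.Perm.append_left _ (ih hS)

theorem pvG_append (lst : List Int) (x c n : Int) (hn : 0 < n) :
    pvG (lst ++ [x]) n c
      = pvG lst n c ++
        (if c = x then (if ((lst.count x : Int)) < n then [((lst.length : Int), x)] else [])
         else []) := by
  unfold pvG
  rw [PySem.List.enumerate_append, List.filter_append, PySem.List.enumerate_cons,
    PySem.List.enumerate_nil]
  simp only [zero_add, List.filter_cons, List.filter_nil]
  have hlen := pv_filterE_length lst 0 c
  by_cases hc : c = x
  · subst x
    simp only [beq_self_eq_true, if_true]
    rw [List.take_append, hlen]
    by_cases hm : ((lst.count c : Int)) < n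
    · rw [if_pos hm]
      rw [List.take_of_length_le (by rw [hlen]; omega)]
      have h2 : n.toNat - lst.count c ≠ 0 := by omega
      cases h : n.toNat - lst.count c with
      | zero => omega
      | succ k => simp
    · rw [if_neg hm]
      have h2 : n.toNat - lst.count c = 0 := by omega
      rw [h2]
      simp
  · have hbeq : (x == c) = false := by simp; exact fun h => hc h.symm
    rw [hbeq]
    simp [hc]

theorem pvK_perm_pvF (n : Int) (hn : 0 < n) (lst : List Int) :
    (pvK lst n).Perm (pvF lst n) := by
  induction lst using List.reverseRecOn with
  | nil => simp [pvK, pvF, PySem.List.enumerate_nil]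
  | append_singleton l x ih =>
    have hfun : pvG (l ++ [x]) n
        = fun c => pvG l n c ++
            (if c = x then (if ((l.count x : Int)) < n then [((l.length : Int), x)] else [])
             else []) :=
      funext fun c => pvG_append l x c n hn
    have hK : pvK (l ++ [x]) n
        = (PySem.Set.ofList (l ++ [x])).flatMap
            (fun c => pvG l n c ++
              (if c = x then (if ((l.count x : Int)) < n then [((l.length : Int), x)] else [])
               else [])) := by
      unfold pvK; rw [hfun]
    have hperm1 := pv_flatMap_perm x
      (if ((l.count x : Int)) < n then [((l.length : Int), x)] else []) (pvG l n)
      (PySem.Set.ofList (l ++ [x])) (PySem.Set.nodup_ofList _)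
    rw [if_pos ((PySem.Set.mem_ofList _ _).2 (by simp))] at hperm1
    have hflat : (PySem.Set.ofList (l ++ [x])).flatMap (pvG l n) = pvK l n := by
      have hS' : PySem.Set.ofList (l ++ [x]) = PySem.Set.add (PySem.Set.ofList l) x := by
        rw [PySem.Set.ofList_eq_foldl, List.foldl_append, ← PySem.Set.ofList_eq_foldl]
        simp
      rw [hS']
      by_cases hx : x ∈ l
      · rw [PySem.Set.add_of_mem ((PySem.Set.mem_ofList _ _).2 hx)]
        rfl
      · rw [PySem.Set.add_of_not_mem (fun h => hx ((PySem.Set.mem_ofList _ _).1 h))]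
        rw [List.flatMap_append]
        have hempty : pvG l n x = [] := by
          unfold pvG
          have h0 : ((PySem.List.enumerate l 0).filter (fun p => p.2 == x)).length = 0 := by
            rw [pv_filterE_length]
            exact List.count_eq_zero_of_not_mem hx
          rw [List.length_eq_zero_iff.1 h0]
          simp
        simp [hempty]
        rfl
    rw [hK, pvF_append]
    exact (hperm1.trans (by rw [hflat])).trans (ih.append_right _)

theorem pvA_loop (n : Int) (hn : 0 < n) (lst : List Int) :
    (lst.foldl (pvStepA n) ([], PySem.Dict.empty)).1 = (pvF lst n).map (fun p => p.2) ∧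
    ∀ c : Int, (lst.foldl (pvStepA n) ([], PySem.Dict.empty)).2.getD c 0
        = min ((lst.count c : Int)) n := by
  induction lst using List.reverseRecOn with
  | nil =>
    refine ⟨by simp [pvF, PySem.List.enumerate_nil], fun c => ?_⟩
    simp only [List.foldl_nil]
    rw [PySem.Dict.getD_empty]
    simp only [List.count_nil, Nat.cast_zero]
    omega
  | append_singleton l x ih =>
    obtain ⟨ih1, ih2⟩ := ih
    rw [List.foldl_append] at *
    simp only [List.foldl_cons, List.foldl_nil] at *
    set s := l.foldl (pvStepA n) ([], PySem.Dict.empty) with hs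
    have hcount : ∀ c : Int, (l ++ [x]).count c = l.count c + (if c = x then 1 else 0) := by
      intro c
      rw [List.count_append]
      by_cases hcx : c = x
      · subst x; simp
      · rw [show List.count c [x] = 0 from List.count_eq_zero.2 (by simp [hcx]), if_neg hcx]
    by_cases hm : ((l.count x : Int)) < n
    · have hcond : s.2.getD x 0 < n := by rw [ih2 x]; omega
      unfold pvStepA
      rw [if_pos hcond]
      constructor
      · show s.1 ++ [x] = _
        rw [pvF_append, if_pos hm, List.map_append, ih1]
        simp
      · intro c
        show (if s.2.contains x then s.2.insert x (s.2.getD x 0 + 1)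
              else s.2.insert x 1).getD c 0 = _
        have hgetD : (if s.2.contains x then s.2.insert x (s.2.getD x 0 + 1)
              else s.2.insert x 1).getD c 0
            = if c = x then s.2.getD x 0 + 1 else s.2.getD c 0 := by
          by_cases hcx : s.2.contains x
          · rw [if_pos hcx, PySem.Dict.getD_insert]
          · rw [if_neg hcx, PySem.Dict.getD_insert]
            have h0 : s.2.getD x 0 = 0 :=
              PySem.Dict.getD_of_not_contains _ _ (by simpa using hcx)
            rw [h0]
            simp
        rw [hgetD, hcount c]
        by_cases hcx : c = x
        · subst x
          rw [if_pos rfl, ih2 c]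
          push_cast
          omega
        · rw [if_neg hcx, ih2 c]
          simp [hcx]
    · have hcond : ¬ s.2.getD x 0 < n := by rw [ih2 x]; omega
      unfold pvStepA
      rw [if_neg hcond]
      refine ⟨by rw [pvF_append, if_neg hm, List.append_nil, ih1], fun c => ?_⟩
      rw [ih2 c, hcount c]
      by_cases hcx : c = x
      · subst x; rw [if_pos rfl]; push_cast; omega
      · rw [if_neg hcx]; simp

theorem pvKept_eq (lst : List Int) (n : Int) (hn : 0 < n) :
    ((PySem.List.enumerate lst).foldl
        (fun d p => d.modify p.2 [] (fun v => v ++ [p])) PySem.Dict.empty).values.foldl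
      (fun acc pairs => acc ++ PySem.List.slice pairs none (some n)) []
    = pvK lst n := by
  set groups := (PySem.List.enumerate lst).foldl
      (fun d p => d.modify p.2 [] (fun v => v ++ [p])) PySem.Dict.empty with hgroups
  have hg : ∀ c, groups.getD c [] = (PySem.List.enumerate lst).filter (fun p => p.2 == c) := by
    intro c
    rw [hgroups, show (PySem.List.enumerate lst).foldl (fun d p => d.modify p.2 [] (fun v => v ++ [p])) PySem.Dict.empty
        = ((PySem.List.enumerate lst).map (fun p => (p.2, p))).foldl (fun d q => d.modify q.1 [] (fun v => v ++ [q.2])) PySem.Dict.empty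
      from (List.foldl_map (f := fun p : Int × Int => (p.2, p)) (g := fun (d : PySem.Dict Int (List (Int × Int))) (q : Int × (Int × Int)) => d.modify q.1 [] (fun v => v ++ [q.2]))).symm]
    rw [PySem.Dict.getD_foldl_modify_append, PySem.Dict.getD_empty]
    simp [List.filter_map, List.map_map, Function.comp_def]
  have hnodup : groups.keys.Nodup := by
    rw [hgroups]
    exact PySem.Dict.nodup_keys_foldl_modify_key _ (fun p : Int × Int => p.2) []
      (fun d p => fun v => v ++ [p]) _ PySem.Dict.nodup_keys_empty
  have hkeys : groups.keys = PySem.Set.ofList lst := by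
    rw [hgroups]
    rw [PySem.Dict.keys_foldl_modify_key (key := fun p : Int × Int => p.2)
      (f := fun d p => fun v => v ++ [p])]
    rw [PySem.Dict.keys_empty, PySem.List.map_snd_enumerate]
    rw [PySem.Set.ofList_eq_foldl]
    rfl
  rw [PySem.Dict.values_eq_map_keys groups hnodup []]
  rw [PySem.List.foldl_append_eq_flatMap, List.nil_append, List.flatMap_map, hkeys]
  unfold pvK
  congr 1
  funext c
  rw [hg c, PySem.List.slice_to _ (le_of_lt hn)]
  rfl

theorem pvB_eq (lst : List Int) (n : Int) (hn : 0 < n) :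
    delete_nth_alt lst n = (PySem.List.sorted (pvK lst n) (fun p => p.1)).map (fun p => p.2) := by
  unfold delete_nth_alt
  rw [if_neg (not_le.2 hn)]
  show (PySem.List.sorted
      (((PySem.List.enumerate lst).foldl
          (fun d p => d.modify p.2 [] (fun v => v ++ [p])) PySem.Dict.empty).values.foldl
        (fun acc pairs => acc ++ PySem.List.slice pairs none (some n)) [])
      (fun p => p.1)).map (fun p => p.2) = _
  rw [pvKept_eq lst n hn]

theorem pvA_nonpos (lst : List Int) (n : Int) (hn : n ≤ 0) : delete_nth lst n = [] := by
  have h : ∀ l : List Int, l.foldl (pvStepA n) ([], PySem.Dict.empty) = ([], PySem.Dict.empty) := by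
    intro l
    induction l with
    | nil => rfl
    | cons a t ih =>
      rw [List.foldl_cons]
      have hstep : pvStepA n ([], PySem.Dict.empty) a = ([], PySem.Dict.empty) := by
        unfold pvStepA
        rw [PySem.Dict.getD_empty, if_neg (by omega)]
      rw [hstep, ih]
  show (lst.foldl (pvStepA n) ([], PySem.Dict.empty)).1 = []
  rw [h lst]

-- ===== VERDICT (by name: the statement is the Claim_ definition above) =====
theorem delete_nth_spec : Claim_equal_delete_nth := by
  intro lst n _
  unfold Spec_delete_nth
  by_cases hn : n ≤ 0
  · rw [pvA_nonpos lst n hn]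
    unfold delete_nth_alt
    rw [if_pos hn]
  · have hn' : 0 < n := by omega
    have hA : delete_nth lst n = (pvF lst n).map (fun p => p.2) :=
      (pvA_loop n hn' lst).1
    rw [hA, pvB_eq lst n hn']
    congr 1
    exact (PySem.List.sorted_eq_of_perm_of_pairwise_lt _ _ _
      (pvK_perm_pvF n hn' lst).symm
      (List.Pairwise.filter _ (PySem.List.pairwise_lt_enumerate lst 0))).symm
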